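-- pv_equiv track=rewrite | github.com/RohanBh/LogicNLG-wip | gen_new_data.py | count_ent_2
-- ===== SOURCE A (Python) =====
-- def count_ent_2(template):
--     last_ent = False
--     total_ents = 0
--     for x in template.split(' '):
--         if x == '[ENT]':
--             if not last_ent:
--                 total_ents += 1
--             last_ent = True
--         elif x.isnumeric():
--             total_ents += 1
--             last_ent = True
--         else:
--             last_ent = False
--     return total_ents
-- ===== SOURCE B (Python) =====
-- def count_ent_2(template):
--     toks = template.split(' ')
--     # numerics always add one; an [ENT] adds one iff its predecessor
--     # (sentinel '' before the first token) is neither [ENT] nor numeric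
--     return sum(t.isnumeric() for t in toks) + sum(
--         t == '[ENT]' and not (p == '[ENT]' or p.isnumeric())
--         for p, t in zip([''] + toks, toks))
-- ===== Notes on version B (the rewrite author's own statement) =====
-- stated objective: simpler
-- what changed: Replaces the running last_ent boolean state machine with two stateless aggregations summed together: count numeric tokens, plus count [ENT] tokens whose predecessor (via zip with a shifted copy) is neither [ENT] nor numeric.
import Mathlib
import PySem

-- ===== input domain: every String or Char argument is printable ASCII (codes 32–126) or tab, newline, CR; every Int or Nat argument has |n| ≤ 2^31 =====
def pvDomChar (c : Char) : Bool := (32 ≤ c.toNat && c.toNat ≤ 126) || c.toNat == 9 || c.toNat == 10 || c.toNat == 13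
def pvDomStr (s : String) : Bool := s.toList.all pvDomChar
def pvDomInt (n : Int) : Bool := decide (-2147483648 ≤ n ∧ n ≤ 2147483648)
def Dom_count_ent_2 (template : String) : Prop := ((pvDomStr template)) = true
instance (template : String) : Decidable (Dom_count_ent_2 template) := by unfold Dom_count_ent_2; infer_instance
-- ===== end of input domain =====

-- B replaces A's running last_ent state machine by two independent stateless counts (simpler decomposition, same O(n) cost).
-- On the printable-ASCII domain str.isnumeric() coincides with str.isdigit(): ported as PySem.Str.strIsdigit (exact on this domain).

-- ===== PORT A =====
-- template.split(' '): sep " " ≠ "", so PySem.Str.split? always returns some; .getD [] cannot fire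
def count_ent_2 (template : String) : Int :=
  (((PySem.Str.split? template " ").getD []).foldl
    (fun (st : Bool × Int) x =>
      if x == "[ENT]" then (true, if !st.1 then st.2 + 1 else st.2)
      else if PySem.Str.strIsdigit x then (true, st.2 + 1)
      else (false, st.2))
    (false, 0)).2

-- ===== PORT B =====
def count_ent_2_alt (template : String) : Int :=
  ((((PySem.Str.split? template " ").getD []).countP (fun t => PySem.Str.strIsdigit t) : Int)) +
  ((List.zip ("" :: ((PySem.Str.split? template " ").getD [])) ((PySem.Str.split? template " ").getD [])).countP
    (fun pt => pt.2 == "[ENT]" && !(pt.1 == "[ENT]" || PySem.Str.strIsdigit pt.1)) : Int)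

-- ===== PRECONDITION & SPEC =====
def Spec_count_ent_2 (template : String) (out : Int) : Prop := out = count_ent_2_alt template
instance (template : String) (out : Int) : Decidable (Spec_count_ent_2 template out) := by unfold Spec_count_ent_2; infer_instance

-- ===== CLAIM (what is proved, stated in full; the proofs are below) =====
def Claim_equal_count_ent_2 : Prop := ∀ (template : String), Dom_count_ent_2 template → Spec_count_ent_2 template (count_ent_2 template)

-- ===== LEMMAS AND PROOFS =====

-- number of [ENT]-run starts in toks, given whether the previous token was entity-like
def pvEntB : Bool → List String → Nat
  | _, [] => 0
  | b, x :: xs =>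
    (if x == "[ENT]" && !b then 1 else 0) + pvEntB (x == "[ENT]" || PySem.Str.strIsdigit x) xs

lemma pvFoldA (toks : List String) (b : Bool) (tot : Int) :
    (toks.foldl
      (fun (st : Bool × Int) x =>
        if x == "[ENT]" then (true, if !st.1 then st.2 + 1 else st.2)
        else if PySem.Str.strIsdigit x then (true, st.2 + 1)
        else (false, st.2))
      (b, tot)).2
    = tot + (toks.countP (fun t => PySem.Str.strIsdigit t) : Int) + (pvEntB b toks : Int) := by
  induction toks generalizing b tot with
  | nil => simp [pvEntB]
  | cons x xs ih =>
    rw [List.foldl_cons]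
    by_cases hx : (x == "[ENT]") = true
    · have hxe : x = "[ENT]" := by simpa using hx
      have hd : PySem.Chars.strIsdigit x.toList = false := by subst hxe; decide
      rw [if_pos hx, ih]
      cases b <;> simp [List.countP_cons, pvEntB, hx, hd] <;> push_cast <;> omega
    · rw [if_neg hx]
      cases hd : PySem.Str.strIsdigit x with
      | false =>
        have hdc : PySem.Chars.strIsdigit x.toList = false := by
          rw [← PySem.Str.strIsdigit_eq]; exact hd
        simp only [reduceIte]; rw [ih]
        simp [List.countP_cons, pvEntB, hx, hdc]
      | true =>
        have hdc : PySem.Chars.strIsdigit x.toList = true := by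
          rw [← PySem.Str.strIsdigit_eq]; exact hd
        simp only [reduceIte]; rw [ih]
        simp [List.countP_cons, pvEntB, hx, hdc]
        push_cast
        omega

lemma pvEntZip (toks : List String) (p : String) :
    ((List.zip (p :: toks) toks).countP
      (fun pt => pt.2 == "[ENT]" && !(pt.1 == "[ENT]" || PySem.Str.strIsdigit pt.1)))
    = pvEntB (p == "[ENT]" || PySem.Str.strIsdigit p) toks := by
  induction toks generalizing p with
  | nil => simp [pvEntB]
  | cons x xs ih =>
    simp only [List.zip_cons_cons, List.countP_cons, pvEntB, ih]
    cases hx : (x == "[ENT]") <;>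
      cases hb : (p == "[ENT]" || PySem.Str.strIsdigit p) <;>
      simp [hx, hb] <;> omega

-- ===== VERDICT (by name: the statement is the Claim_ definition above) =====
theorem count_ent_2_spec : Claim_equal_count_ent_2 := by
  intro template _
  unfold Spec_count_ent_2 count_ent_2 count_ent_2_alt
  rw [pvFoldA, pvEntZip]
  push_cast
  simp [show PySem.Chars.strIsdigit ([] : List Char) = false from by decide]
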